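-- pv_equiv track=rewrite | github.com/tanmay-8/dm | olap/olap.py | dice_cube
-- ===== SOURCE A (Python) =====
-- def dice_cube(cube_rows, dims, measure, filters):
--     res = []
--     for r in cube_rows:
--         ok = True
--         for d, v in filters.items():
--             if isinstance(v, (list, tuple, set)):
--                 if r[d] not in [str(x) for x in v]:
--                     ok = False
--                     break
--             else:
--                 if r[d] != str(v):
--                     ok = False
--                     break
--         if ok:
--             res.append({d: r[d] for d in dims + [measure]})
--     return res
-- ===== SOURCE B (Python) =====
-- def dice_cube(cube_rows, dims, measure, filters):
--     # Filter-at-a-time narrowing of the row list, then a staged projection: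
--     # dedup the projection keys once, and emit plain key/value pairs per row.
--     rows = cube_rows
--     for d, v in filters.items():
--         allowed = [str(x) for x in v] if isinstance(v, (list, tuple, set)) else [str(v)]
--         rows = [r for r in rows if r[d] in allowed]
--     keys = []
--     for d in dims + [measure]:
--         if d not in keys:
--             keys.append(d)
--     return [{k: r[k] for k in keys} for r in rows]
-- ===== Notes on version B (the rewrite author's own statement) =====
-- stated objective: alternative
-- what changed: B replaces A's row-at-a-time loop (checking every filter per row and building each projected dict by repeated insertion) with filter-at-a-time incremental narrowing of the row list, followed by a one-time dedup of the projection keys and a direct pair-list projection of the survivors.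
-- outside the precondition, e.g. on dice_cube([{'a': '1'}], ['a'], 'm', {'a': ['2'], 'b': ['x']}): A returns [], B returns []
import Mathlib
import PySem

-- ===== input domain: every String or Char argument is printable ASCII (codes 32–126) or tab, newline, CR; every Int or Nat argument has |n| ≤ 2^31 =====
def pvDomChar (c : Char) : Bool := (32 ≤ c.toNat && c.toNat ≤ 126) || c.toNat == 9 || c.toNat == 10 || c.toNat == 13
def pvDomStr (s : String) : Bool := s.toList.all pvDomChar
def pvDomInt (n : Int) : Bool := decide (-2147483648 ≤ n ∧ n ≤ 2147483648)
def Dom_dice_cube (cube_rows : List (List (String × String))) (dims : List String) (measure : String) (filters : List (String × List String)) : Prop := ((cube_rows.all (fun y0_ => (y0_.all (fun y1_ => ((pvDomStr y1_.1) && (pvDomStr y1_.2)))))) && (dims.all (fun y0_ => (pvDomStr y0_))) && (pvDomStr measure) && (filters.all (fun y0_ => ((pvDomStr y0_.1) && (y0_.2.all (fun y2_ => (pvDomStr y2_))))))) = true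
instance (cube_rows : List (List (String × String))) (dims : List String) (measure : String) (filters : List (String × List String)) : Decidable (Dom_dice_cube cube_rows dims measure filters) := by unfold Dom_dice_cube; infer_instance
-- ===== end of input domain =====

-- ===== PORT A =====
-- B changes the decomposition: filter-at-a-time narrowing + staged key dedup and pair-list
-- projection, instead of A's row-at-a-time all-filter check with dict-insertion projection;
-- objective: alternative.
-- Python dict row lookup r[d]: first match; Pre_ guarantees the key is present, so the default is never the result.
def pvRowGet (r : List (String × String)) (d : String) : String :=
  (PySem.Dict.mk r).getD d ""

-- A's projection {d: r[d] for d in dims + [measure]}: repeated dict insertion, then items.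
def pvProjRow (r : List (String × String)) (dims : List String) (measure : String) : List (String × String) :=
  ((dims ++ [measure]).foldl (fun acc d => acc.insert d (pvRowGet r d)) PySem.Dict.empty).items

def dice_cube (cube_rows : List (List (String × String))) (dims : List String) (measure : String) (filters : List (String × List String)) : List (List (String × String)) :=
  cube_rows.foldl (fun res r =>
    if filters.all (fun fv => fv.2.contains (pvRowGet r fv.1)) then
      res ++ [pvProjRow r dims measure]
    else res) []

-- ===== PORT B =====
-- r[k] on an assoc-list row: first match (exact for a Python dict; "" unreachable under Pre_).
def altLookup : List (String × String) → String → String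
  | [], _ => ""
  | (k, v) :: rest, d => if k = d then v else altLookup rest d

-- 'for d, v in filters.items(): rows = [r for r in rows if r[d] in allowed]'
def altNarrow : List (String × List String) → List (List (String × String)) → List (List (String × String))
  | [], rows => rows
  | fv :: fs, rows => altNarrow fs (rows.filter (fun r => fv.2.contains (altLookup r fv.1)))

-- 'keys = []; for d in dims + [measure]: if d not in keys: keys.append(d)'
def altDedup : List String → List String → List String
  | acc, [] => acc
  | acc, d :: ds => if acc.contains d then altDedup acc ds else altDedup (acc ++ [d]) ds

def dice_cube_alt (cube_rows : List (List (String × String))) (dims : List String) (measure : String) (filters : List (String × List String)) : List (List (String × String)) :=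
  let rows := altNarrow filters cube_rows
  let keys := altDedup [] (dims ++ [measure])
  rows.map (fun r => keys.map (fun k => (k, altLookup r k)))

-- ===== PRECONDITION & SPEC =====
-- Pre_ excludes inputs where some row lacks a filter key or a dims/measure key (KeyError risk in both
-- Pythons); it also over-excludes inputs on which A still returns because the missing key is shielded by
-- an earlier failing filter or by the row never matching.
def Pre_dice_cube (cube_rows : List (List (String × String))) (dims : List String) (measure : String) (filters : List (String × List String)) : Prop :=
  ∀ r ∈ cube_rows, (∀ fv ∈ filters, (PySem.Dict.mk r).contains fv.1) ∧
    (∀ d ∈ dims, (PySem.Dict.mk r).contains d) ∧ (PySem.Dict.mk r).contains measure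
instance (cube_rows : List (List (String × String))) (dims : List String) (measure : String) (filters : List (String × List String)) : Decidable (Pre_dice_cube cube_rows dims measure filters) := by unfold Pre_dice_cube; infer_instance

def pvWitness_dice_cube : (List (List (String × String))) × List String × String × (List (String × List String)) :=
  ([[("a", "1"), ("m", "5")], [("a", "2"), ("m", "7")]], ["a"], "m", [("a", ["1"])])

def Spec_dice_cube (cube_rows : List (List (String × String))) (dims : List String) (measure : String) (filters : List (String × List String)) (out : List (List (String × String))) : Prop := out = dice_cube_alt cube_rows dims measure filters
instance (cube_rows : List (List (String × String))) (dims : List String) (measure : String) (filters : List (String × List String)) (out : List (List (String × String))) : Decidable (Spec_dice_cube cube_rows dims measure filters out) := by unfold Spec_dice_cube; infer_instance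

-- ===== CLAIM =====
def Claim_equal_dice_cube : Prop := ∀ (cube_rows : List (List (String × String))) (dims : List String) (measure : String) (filters : List (String × List String)), Dom_dice_cube cube_rows dims measure filters → Pre_dice_cube cube_rows dims measure filters → Spec_dice_cube cube_rows dims measure filters (dice_cube cube_rows dims measure filters)

-- ===== LEMMAS AND PROOFS =====
-- B's linear first-match lookup is A's Dict lookup.
theorem altLookup_eq (r : List (String × String)) (d : String) :
    altLookup r d = pvRowGet r d := by
  induction r with
  | nil => rfl
  | cons p rest ih =>
      obtain ⟨k, v⟩ := p
      simp only [altLookup, pvRowGet, PySem.Dict.getD_eq_get?_getD, PySem.Dict.get?_mk_cons] at *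
      by_cases h : k = d <;> simp [h, ih]

-- Iterated per-filter narrowing equals one filter by the conjunction of all filter tests.
theorem altNarrow_eq_filter_all (filters : List (String × List String)) (rows : List (List (String × String))) :
    altNarrow filters rows
      = rows.filter (fun r => filters.all (fun fv => fv.2.contains (pvRowGet r fv.1))) := by
  induction filters generalizing rows with
  | nil => simp [altNarrow]
  | cons fv fs ih =>
      simp only [altNarrow, ih, List.filter_filter, List.all_cons]
      refine List.filter_congr (fun r _ => ?_)
      rw [altLookup_eq]
      exact Bool.and_comm _ _

-- A's dict-insertion projection, started from any accumulator of already-seen keys,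
-- yields exactly the dedup-order keys paired with their looked-up values.
theorem foldl_insert_items (g : String → String) (ks acc : List String) (h : acc.Nodup) :
    ((ks.foldl (fun d k => d.insert k (g k)) (PySem.Dict.mk (acc.map (fun k => (k, g k))))).items)
      = (altDedup acc ks).map (fun k => (k, g k)) := by
  induction ks generalizing acc with
  | nil => simp [altDedup]
  | cons k ks ih =>
      have hkeys : (PySem.Dict.mk (acc.map (fun k => (k, g k)))).keys = acc := by
        simp only [PySem.Dict.keys, List.map_map]
        exact (List.map_congr_left (fun a _ => rfl)).trans (List.map_id _)
      by_cases hc : k ∈ acc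
      · have hcon : (PySem.Dict.mk (acc.map (fun a => (a, g a)))).contains k = true := by
          rw [PySem.Dict.contains_eq_decide_mem_keys, hkeys]; simp [hc]
        have hins : (PySem.Dict.mk (acc.map (fun a => (a, g a)))).insert k (g k)
            = PySem.Dict.mk (acc.map (fun a => (a, g a))) := by
          apply PySem.Dict.ext
          rw [PySem.Dict.items_insert_of_contains _ _ hcon]
          rw [List.map_map]
          apply List.map_congr_left
          intro a _
          by_cases hak : a = k <;> simp [hak]
        simp only [List.foldl_cons, hins, altDedup, List.contains_eq_mem, hc, decide_true,
          if_true]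
        exact ih acc h
      · have hcon : (PySem.Dict.mk (acc.map (fun a => (a, g a)))).contains k = false := by
          rw [PySem.Dict.contains_eq_decide_mem_keys, hkeys]; simp [hc]
        have hins : (PySem.Dict.mk (acc.map (fun a => (a, g a)))).insert k (g k)
            = PySem.Dict.mk ((acc ++ [k]).map (fun a => (a, g a))) := by
          apply PySem.Dict.ext
          rw [PySem.Dict.items_insert_of_not_contains _ _ hcon]
          simp
        simp only [List.foldl_cons, hins, altDedup, List.contains_eq_mem, hc, decide_false]
        refine ih (acc ++ [k]) (h.append (List.nodup_singleton k) ?_)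
        intro a ha hk
        simp only [List.mem_singleton] at hk
        exact hc (hk ▸ ha)

-- Per-row: A's projected dict items = B's deduped pair list.
theorem pvProjRow_eq (r : List (String × String)) (dims : List String) (measure : String) :
    pvProjRow r dims measure
      = (altDedup [] (dims ++ [measure])).map (fun k => (k, altLookup r k)) := by
  have := foldl_insert_items (g := fun k => pvRowGet r k) (dims ++ [measure]) [] List.nodup_nil
  simp only [List.map_nil] at this
  have hE : PySem.Dict.mk ([] : List (String × String)) = PySem.Dict.empty := rfl
  rw [pvProjRow, ← hE, this]
  exact (List.map_congr_left (fun k _ => by rw [altLookup_eq])).symm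

-- ===== VERDICT =====
theorem dice_cube_spec : Claim_equal_dice_cube := by
  intro cube_rows dims measure filters _ _
  unfold Spec_dice_cube dice_cube dice_cube_alt
  rw [PySem.List.foldl_append_if, altNarrow_eq_filter_all]
  simp only [List.map_filter_eq_foldr, List.nil_append, pvProjRow_eq]
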